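-- pv_equiv track=rewrite | github.com/lounesbbkr/-hash- | compres.py | xor_columns
-- ===== SOURCE A (Python) =====
-- def xor_columns(bits):
--     # Calculate the number of padding zeros needed
--     padding_zeros = (256 - len(bits) % 256) % 256
--
--     # Add padding zeros to the bits string
--     bits += '0' * padding_zeros
--
--     # Divide the bits string into lines of 256 bits
--     lines = [bits[i:i+256] for i in range(0, len(bits), 256)]
--
--     # Perform XOR between the elements of each column
--     result = ""
--     for i in range(256):
--         column_bits = [line[i] for line in lines]
--         column_xor = str(int(column_bits[0]))
--         for j in range(1, len(column_bits)):
--             column_xor = str(int(column_xor) ^ int(column_bits[j]))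
--         result += column_xor
--
--     return result
-- ===== SOURCE B (Python) =====
-- def xor_columns(bits):
--     # Pad to a multiple of 256 and split into 256-char lines.
--     bits += '0' * ((256 - len(bits) % 256) % 256)
--     lines = [bits[i:i+256] for i in range(0, len(bits), 256)]
--     # Row-major fold: keep one integer accumulator per column.
--     acc = [int(c) for c in lines[0]]
--     for line in lines[1:]:
--         acc = [a ^ int(c) for a, c in zip(acc, line)]
--     return ''.join(str(v) for v in acc)
-- ===== Notes on version B (the rewrite author's own statement) =====
-- stated objective: alternative
-- what changed: A scans column-by-column with a string accumulator re-parsed by int() and re-rendered by str() at every XOR step; B does one row-major fold over the lines, keeping a list of integer accumulators (one per column) and converting to a string only once at the end (avoids the per-step str/int conversions, though that was not measurable in a timing run).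
-- outside the precondition, e.g. on xor_columns(''): A raises IndexError, B raises IndexError; on xor_columns('1a'): A raises ValueError, B raises ValueError
import Mathlib
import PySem

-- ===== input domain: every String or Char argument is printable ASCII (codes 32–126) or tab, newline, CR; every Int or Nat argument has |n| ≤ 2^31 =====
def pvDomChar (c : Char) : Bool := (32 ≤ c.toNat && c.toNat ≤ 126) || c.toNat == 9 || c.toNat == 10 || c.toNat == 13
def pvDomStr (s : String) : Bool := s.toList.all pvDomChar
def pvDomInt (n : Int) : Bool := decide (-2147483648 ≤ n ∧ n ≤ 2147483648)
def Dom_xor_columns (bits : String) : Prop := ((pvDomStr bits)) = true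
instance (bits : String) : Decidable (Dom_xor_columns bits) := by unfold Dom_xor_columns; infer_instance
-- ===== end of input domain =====

-- B replaces A's column-major scan with its per-step str/int conversions by one row-major fold
-- over the lines, keeping an integer accumulator per column (objective: alternative).

-- int(c) for a one-character string; none (Python ValueError on a non-digit) is excluded by Pre_
def pvInt1 (c : Char) : Int := (PySem.Int.ofChars? [c]).getD 0

-- ===== PORT A =====
def xor_columns (bits : String) : String :=
  -- padding_zeros = (256 - len(bits) % 256) % 256  (len ≥ 0, so Nat % is exact here)
  let padding_zeros : Nat := (256 - bits.toList.length % 256) % 256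
  -- bits += '0' * padding_zeros
  let b : List Char := bits.toList ++ List.replicate padding_zeros '0'
  -- lines = [bits[i:i+256] for i in range(0, len(bits), 256)]
  let lines : List (List Char) :=
    (PySem.List.pyRange 0 (b.length : Int) 256).map
      (fun i => PySem.List.slice b (some i) (some (i + 256)))
  -- for i in range(256): …  (line[i] is always in range since every line has 256 chars;
  --  column_bits[0] would be an IndexError for empty input — excluded by Pre_)
  let result : List Char :=
    (PySem.List.pyRange 0 256 1).foldl
      (fun result i =>
        let column_bits : List Char := lines.map (fun line => PySem.List.pyGetD line i ' ')
        let column_xor : List Char :=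
          PySem.Int.toChars (pvInt1 (PySem.List.pyGetD column_bits 0 ' '))
        let column_xor : List Char :=
          (PySem.List.pyRange 1 (column_bits.length : Int) 1).foldl
            (fun cx j =>
              PySem.Int.toChars
                (PySem.Int.bxor ((PySem.Int.ofChars? cx).getD 0)
                  (pvInt1 (PySem.List.pyGetD column_bits j ' '))))
            column_xor
        result ++ column_xor)
      []
  String.ofList result

-- ===== PORT B =====
def xor_columns_alt (bits : String) : String :=
  -- bits += '0' * ((256 - len(bits) % 256) % 256)
  let b : List Char := bits.toList ++ List.replicate ((256 - bits.toList.length % 256) % 256) '0'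
  -- lines = [bits[i:i+256] for i in range(0, len(bits), 256)]
  let lines : List (List Char) :=
    (PySem.List.pyRange 0 (b.length : Int) 256).map
      (fun i => PySem.List.slice b (some i) (some (i + 256)))
  match lines with
  | [] => ""   -- lines[0] raises IndexError in Python (empty input); excluded by Pre_
  | l0 :: rest =>
    -- acc = [int(c) for c in lines[0]]
    let acc : List Int := l0.map pvInt1
    -- for line in lines[1:]: acc = [a ^ int(c) for a, c in zip(acc, line)]
    let acc : List Int :=
      rest.foldl (fun acc line => (acc.zip line).map (fun p => PySem.Int.bxor p.1 (pvInt1 p.2))) acc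
    -- ''.join(str(v) for v in acc)  (join with empty separator = concatenation)
    String.ofList ((acc.map PySem.Int.toChars).flatten)

-- ===== PRECONDITION & SPEC =====
def pvDigits : List Char := ['0', '1', '2', '3', '4', '5', '6', '7', '8', '9']

-- Pre_ excludes the empty string (A's column_bits[0] raises IndexError) and strings with a
-- non-digit character (A's int(c) raises ValueError); on all other inputs A returns normally.
def Pre_xor_columns (bits : String) : Prop :=
  bits.toList ≠ [] ∧ bits.toList.all (fun c => c ∈ pvDigits) = true
instance (bits : String) : Decidable (Pre_xor_columns bits) := by
  unfold Pre_xor_columns; infer_instance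

def pvWitness_xor_columns : String := "0110"

def Spec_xor_columns (bits : String) (out : String) : Prop := out = xor_columns_alt bits
instance (bits : String) (out : String) : Decidable (Spec_xor_columns bits out) := by
  unfold Spec_xor_columns; infer_instance

-- ===== CLAIM (what is proved, stated in full; the proofs are below) =====
def Claim_equal_xor_columns : Prop :=
  ∀ (bits : String), Dom_xor_columns bits → Pre_xor_columns bits →
    Spec_xor_columns bits (xor_columns bits)

-- ===== LEMMAS AND PROOFS =====

theorem pvInt1_digit {c : Char} (h : c ∈ pvDigits) : 0 ≤ pvInt1 c ∧ pvInt1 c < 16 := by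
  fin_cases h <;> decide

theorem pvRoundtrip (v : Int) (h0 : 0 ≤ v) (h1 : v < 16) :
    PySem.Int.ofChars? (PySem.Int.toChars v) = some v := by
  interval_cases v <;> decide

theorem pvBxorBounds {a b : Int} (ha0 : 0 ≤ a) (ha1 : a < 16) (hb0 : 0 ≤ b) (hb1 : b < 16) :
    0 ≤ PySem.Int.bxor a b ∧ PySem.Int.bxor a b < 16 := by
  rw [PySem.Int.bxor_of_nonneg ha0 hb0]
  refine ⟨Int.natCast_nonneg _, ?_⟩
  have : a.toNat ^^^ b.toNat < 16 := by
    have := @Nat.xor_lt_two_pow a.toNat b.toNat 4 (by omega) (by omega)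
    simpa using this
  exact_mod_cast this

-- A's inner j-loop (string accumulator, re-parsed each step) computes str of the integer xor-fold.
theorem pvStrFold (cs : List Char) : ∀ (v : Int), 0 ≤ v → v < 16 → (∀ c ∈ cs, c ∈ pvDigits) →
    cs.foldl
      (fun cx c =>
        PySem.Int.toChars (PySem.Int.bxor ((PySem.Int.ofChars? cx).getD 0) (pvInt1 c)))
      (PySem.Int.toChars v)
    = PySem.Int.toChars (cs.foldl (fun w c => PySem.Int.bxor w (pvInt1 c)) v) := by
  induction cs with
  | nil => intro v _ _ _; rfl
  | cons c cs ih =>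
    intro v h0 h1 hd
    have hc := pvInt1_digit (hd c (by simp))
    have hb := pvBxorBounds h0 h1 hc.1 hc.2
    simp only [List.foldl_cons, pvRoundtrip v h0 h1, Option.getD_some]
    exact ih _ hb.1 hb.2 (fun x hx => hd x (by simp [hx]))

-- B's row-major fold, read column-wise.
theorem pvFoldB (rest : List (List Char)) : ∀ (acc : List Int),
    (∀ l ∈ rest, l.length = acc.length) →
    rest.foldl (fun acc line => (acc.zip line).map (fun p => PySem.Int.bxor p.1 (pvInt1 p.2))) acc
    = (List.range acc.length).map
        (fun i => rest.foldl (fun v line => PySem.Int.bxor v (pvInt1 (line.getD i ' ')))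
          (acc.getD i 0)) := by
  induction rest with
  | nil =>
    intro acc _
    apply List.ext_getElem (by simp)
    intro i h1 h2
    simp [List.getD_eq_getElem?_getD, List.getElem?_eq_getElem (by simpa using h2)]
  | cons l rest ih =>
    intro acc hlen
    have hl : l.length = acc.length := hlen l (by simp)
    have hstep : ((acc.zip l).map (fun p => PySem.Int.bxor p.1 (pvInt1 p.2))).length = acc.length := by
      simp [hl]
    simp only [List.foldl_cons]
    rw [ih _ (by intro l' h'; rw [hstep]; exact hlen l' (by simp [h'])), hstep]
    apply List.map_congr_left
    intro i hi
    have hi' : i < acc.length := List.mem_range.mp hi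
    congr 1
    rw [List.getD_eq_getElem?_getD, List.getD_eq_getElem?_getD, List.getD_eq_getElem?_getD]
    rw [List.getElem?_eq_getElem (by simpa [hl] using hi'), List.getElem?_eq_getElem hi',
        List.getElem?_eq_getElem (by omega : i < l.length)]
    simp [List.getElem_zip]

-- Core equality, for any nonempty list of 256-char digit lines.
theorem pvMain (l0 : List Char) (rest : List (List Char))
    (hlen : ∀ l ∈ l0 :: rest, l.length = 256)
    (hdig : ∀ l ∈ l0 :: rest, ∀ c ∈ l, c ∈ pvDigits) :
    (PySem.List.pyRange 0 256 1).foldl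
      (fun result i =>
        let column_bits : List Char :=
          (l0 :: rest).map (fun line => PySem.List.pyGetD line i ' ')
        let column_xor : List Char :=
          PySem.Int.toChars (pvInt1 (PySem.List.pyGetD column_bits 0 ' '))
        let column_xor : List Char :=
          (PySem.List.pyRange 1 (column_bits.length : Int) 1).foldl
            (fun cx j =>
              PySem.Int.toChars
                (PySem.Int.bxor ((PySem.Int.ofChars? cx).getD 0)
                  (pvInt1 (PySem.List.pyGetD column_bits j ' '))))
            column_xor
        result ++ column_xor)
      []
    = (((rest.foldl
          (fun acc line => (acc.zip line).map (fun p => PySem.Int.bxor p.1 (pvInt1 p.2)))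
          (l0.map pvInt1)).map PySem.Int.toChars).flatten) := by
  have hl0 : l0.length = 256 := hlen l0 (by simp)
  rw [pvFoldB rest (l0.map pvInt1) (by intro l h; simp [hlen l (by simp [h]), hl0])]
  simp only [List.length_map, hl0]
  rw [show (256:Int) = ((256:Nat):Int) from rfl, PySem.List.pyRange_zero_nat, List.foldl_map]
  rw [List.map_map, ← List.flatMap_def]
  rw [PySem.List.foldl_append_eq_flatMap]
  rw [List.nil_append]
  apply List.flatMap_congr
  intro j hj
  have hj' : j < 256 := List.mem_range.mp hj
  simp only [PySem.List.pyGetD_natCast, List.map_cons, Function.comp_apply]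
  rw [PySem.List.pyGetD_zero_cons]
  rw [show (((l0 :: rest).length : Nat) : Int)
      = ((((l0.getD j ' ') :: rest.map (fun line => line.getD j ' ')).length : Nat) : Int) by simp]
  rw [PySem.List.foldl_pyRange_pyGetD' (l0.getD j ' ' :: rest.map (fun line => line.getD j ' '))
      ' '
      (fun cx c => PySem.Int.toChars (PySem.Int.bxor ((PySem.Int.ofChars? cx).getD 0) (pvInt1 c)))
      _ (by norm_num : (0:Int) ≤ 1)]
  rw [show ((1:Int).toNat) = 1 from rfl, List.drop_one, List.tail_cons]
  rw [pvStrFold]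
  · rw [List.foldl_map]
    congr 1
    rw [List.getD_eq_getElem?_getD, List.getD_eq_getElem?_getD,
        List.getElem?_eq_getElem (show j < (List.map pvInt1 l0).length by simpa [hl0] using hj'),
        List.getElem?_eq_getElem (show j < l0.length by omega)]
    simp
  · exact (pvInt1_digit (hdig l0 (by simp) _ (by rw [List.getD_eq_getElem?_getD, List.getElem?_eq_getElem (by omega : j < l0.length)]; exact List.getElem_mem _))).1
  · exact (pvInt1_digit (hdig l0 (by simp) _ (by rw [List.getD_eq_getElem?_getD, List.getElem?_eq_getElem (by omega : j < l0.length)]; exact List.getElem_mem _))).2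
  · intro c hc
    obtain ⟨line, hline, rfl⟩ := List.mem_map.mp hc
    have hll : line.length = 256 := hlen line (by simp [hline])
    exact hdig line (by simp [hline]) _
      (by rw [List.getD_eq_getElem?_getD, List.getElem?_eq_getElem (by omega : j < line.length)]; exact List.getElem_mem _)

-- The padded-and-chunked list of lines, characterised as drop/take chunks.
theorem pvLines (b : List Char) (k : Nat) (hk : b.length = 256 * k) :
    (PySem.List.pyRange 0 (b.length : Int) 256).map
      (fun i => PySem.List.slice b (some i) (some (i + 256)))
    = (List.range k).map (fun j => (b.drop (256 * j)).take 256) := by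
  rw [PySem.List.pyRange_of_pos 0 (b.length : Int) (by norm_num), List.map_map]
  have hcount : (if (0:Int) < (b.length : Int) - 0 then ((((b.length:Int)) - 0 + 256 - 1) / 256).toNat else 0) = k := by
    rcases Nat.eq_zero_or_pos k with h0 | h0
    · subst h0; simp [hk]
    · rw [if_pos (by rw [hk]; push_cast; omega)]
      rw [show ((b.length:Int) - 0 + 256 - 1) = 255 + (k:Int) * 256 by rw [hk]; push_cast; ring]
      rw [Int.add_mul_ediv_right _ _ (by norm_num)]
      norm_num
  rw [show (if (0:Int) < (b.length:Int) then ((((b.length:Int)) - 0 + 256 - 1) / 256).toNat else 0) = k by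
        simpa using hcount]
  apply List.map_congr_left
  intro j hj
  simp only [Function.comp_apply]
  rw [show ((0:Int) + 256 * (j:Int)) = ((256*j : Nat):Int) by push_cast; ring]
  rw [show (((256*j:Nat):Int) + 256) = ((256*j:Nat):Int) + ((256:Nat):Int) by norm_num]
  exact PySem.List.slice_natCast_add b (256*j) 256

theorem xor_columns_spec : Claim_equal_xor_columns := by
  intro bits _ hpre
  obtain ⟨hne, hdigb⟩ := hpre
  have hdig0 : ∀ c ∈ bits.toList, c ∈ pvDigits := by
    intro c hc
    simpa using List.all_eq_true.mp hdigb c hc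
  simp only [Spec_xor_columns, xor_columns, xor_columns_alt]
  set pad : Nat := (256 - bits.toList.length % 256) % 256 with hpad
  set b : List Char := bits.toList ++ List.replicate pad '0' with hb
  have hlen0 : 0 < bits.toList.length := List.length_pos_iff.mpr hne
  have hbl : b.length = bits.toList.length + pad := by simp [hb]
  have hmod : b.length % 256 = 0 := by rw [hbl, hpad]; omega
  have hk : b.length = 256 * (b.length / 256) := by omega
  set k : Nat := b.length / 256 with hkdef
  have hk1 : 1 ≤ k := by omega
  have hbdig : ∀ c ∈ b, c ∈ pvDigits := by
    intro c hc
    rcases List.mem_append.mp hc with h | h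
    · exact hdig0 c h
    · rw [List.eq_of_mem_replicate h]; decide
  rw [pvLines b k hk]
  have hchunklen : ∀ l ∈ (List.range k).map (fun j => (b.drop (256 * j)).take 256),
      l.length = 256 := by
    intro l hl
    obtain ⟨j, hj, rfl⟩ := List.mem_map.mp hl
    have hj' : j < k := List.mem_range.mp hj
    simp only [List.length_take, List.length_drop]
    omega
  have hchunkdig : ∀ l ∈ (List.range k).map (fun j => (b.drop (256 * j)).take 256),
      ∀ c ∈ l, c ∈ pvDigits := by
    intro l hl c hc
    obtain ⟨j, hj, rfl⟩ := List.mem_map.mp hl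
    exact hbdig c (List.mem_of_mem_drop (List.mem_of_mem_take hc))
  have hLne : (List.range k).map (fun j => (b.drop (256 * j)).take 256) ≠ [] := by
    simp [List.range_eq_nil]; omega
  rcases hcons : (List.range k).map (fun j => (b.drop (256 * j)).take 256) with _ | ⟨l0, rest⟩
  · exact absurd hcons hLne
  · rw [hcons] at hchunklen hchunkdig
    exact congrArg String.ofList (pvMain l0 rest hchunklen hchunkdig)
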